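-- pv_equiv track=rewrite | github.com/SerzhKorochan/backup-photos | app/vk_api/models/vk_api_model.py | __get_max_photo_size
-- ===== SOURCE A (Python) =====
-- def __get_max_photo_size(sizes: list):
--     max_size = sizes[0].get('width') * sizes[0].get('height')
--     max_index = 0
--
--     for i in range(1, len(sizes)):
--
--         if max_size < (sizes[i].get('width') * sizes[i].get('height')):
--             max_size = sizes[i].get('width') * sizes[i].get('height')
--             max_index = i
--
--     if max_size == 0:
--         index_of_max_quality = -1
--         max_index = index_of_max_quality
--
--     return sizes[max_index], max_size
-- ===== SOURCE B (Python) =====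
-- def __get_max_photo_size(sizes: list):
--     areas = [s.get('width') * s.get('height') for s in sizes]
--     max_size = max(areas)
--     best = sizes[areas.index(max_size)] if max_size != 0 else sizes[-1]
--     return best, max_size
-- ===== Notes on version B (the rewrite author's own statement) =====
-- stated objective: simpler
-- what changed: B replaces A's hand-written running-maximum loop with index bookkeeping by building the area list once and reading the answer off with max() and list.index(), keeping the last-element fallback when the maximal area is 0.
import Mathlib
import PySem

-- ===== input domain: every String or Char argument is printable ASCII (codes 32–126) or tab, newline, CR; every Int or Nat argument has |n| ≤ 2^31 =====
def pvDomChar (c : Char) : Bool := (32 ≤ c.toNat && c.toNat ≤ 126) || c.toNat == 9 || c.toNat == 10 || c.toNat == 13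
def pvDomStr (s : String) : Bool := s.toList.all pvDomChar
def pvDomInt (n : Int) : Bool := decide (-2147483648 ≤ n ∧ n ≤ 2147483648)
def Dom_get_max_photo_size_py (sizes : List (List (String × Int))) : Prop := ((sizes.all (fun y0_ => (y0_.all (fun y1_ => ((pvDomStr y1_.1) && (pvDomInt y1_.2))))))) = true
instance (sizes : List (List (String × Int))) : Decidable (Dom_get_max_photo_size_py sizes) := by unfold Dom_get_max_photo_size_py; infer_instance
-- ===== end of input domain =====

-- B computes the area table once and reads the answer off with max/index instead of
-- running A's hand-written running-maximum loop; objective: simpler. Same cost, O(n).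

-- shared helper: Python's `s.get('width') * s.get('height')` (dict semantics; under
-- Pre_ both keys are present, so `.getD … 0` never takes its default)
def pvArea (s : List (String × Int)) : Int :=
  (PySem.Dict.getD (PySem.Dict.ofList s) "width" 0) * (PySem.Dict.getD (PySem.Dict.ofList s) "height" 0)

-- ===== PORT A =====
def get_max_photo_size_py (sizes : List (List (String × Int))) : (List (String × Int)) × Int :=
  let ms0 : Int := pvArea (PySem.List.pyGetD sizes 0 [])
  let st : Int × Int :=
    (PySem.List.pyRange 1 sizes.length 1).foldl
      (fun (p : Int × Int) i =>
        if p.1 < pvArea (PySem.List.pyGetD sizes i []) then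
          (pvArea (PySem.List.pyGetD sizes i []), i)
        else p)
      (ms0, 0)
  let max_index : Int := if st.1 = 0 then -1 else st.2
  (PySem.List.pyGetD sizes max_index [], st.1)

-- ===== PORT B =====
def get_max_photo_size_py_alt (sizes : List (List (String × Int))) : (List (String × Int)) × Int :=
  let areas : List Int := sizes.map pvArea
  let max_size : Int := (PySem.List.max? areas (fun y => y)).getD 0
  let best : List (String × Int) :=
    if max_size ≠ 0 then
      PySem.List.pyGetD sizes (((PySem.List.index? areas max_size).getD 0 : Nat) : Int) []
    else PySem.List.pyGetD sizes (-1) []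
  (best, max_size)

-- ===== PRECONDITION & SPEC =====
-- A raises IndexError on an empty list and TypeError (None * …) when a dict lacks 'width' or 'height';
-- Pre_ excludes exactly those inputs.
def Pre_get_max_photo_size_py (sizes : List (List (String × Int))) : Prop :=
  sizes ≠ [] ∧ ∀ s ∈ sizes, (PySem.Dict.contains (PySem.Dict.ofList s) "width"
    ∧ PySem.Dict.contains (PySem.Dict.ofList s) "height")
instance (sizes : List (List (String × Int))) : Decidable (Pre_get_max_photo_size_py sizes) := by unfold Pre_get_max_photo_size_py; infer_instance
def pvWitness_get_max_photo_size_py : (List (List (String × Int))) :=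
  [[("width", 2), ("height", 3)], [("width", 4), ("height", 1)]]

def Spec_get_max_photo_size_py (sizes : List (List (String × Int))) (out : (List (String × Int)) × Int) : Prop := out = get_max_photo_size_py_alt sizes
instance (sizes : List (List (String × Int))) (out : (List (String × Int)) × Int) : Decidable (Spec_get_max_photo_size_py sizes out) := by unfold Spec_get_max_photo_size_py; infer_instance

-- ===== CLAIM (what is proved, stated in full; the proofs are below) =====
def Claim_equal_get_max_photo_size_py : Prop := ∀ (sizes : List (List (String × Int))), Dom_get_max_photo_size_py sizes → Pre_get_max_photo_size_py sizes → Spec_get_max_photo_size_py sizes (get_max_photo_size_py sizes)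

-- ===== LEMMAS AND PROOFS =====

-- the running-maximum loop of A, over the list of areas, carrying the next index
def pvLoopA (l : List Int) (a : Int) (p : Int × Int) : Int × Int :=
  match l with
  | [] => p
  | x :: t => pvLoopA t (a + 1) (if p.1 < x then (x, a) else p)

theorem pvLoopA_nil (a : Int) (p : Int × Int) : pvLoopA [] a p = p := rfl
theorem pvLoopA_cons (x : Int) (t : List Int) (a : Int) (p : Int × Int) :
    pvLoopA (x :: t) a p = pvLoopA t (a + 1) (if p.1 < x then (x, a) else p) := rfl

theorem pv_le_foldl_max (l : List Int) (m : Int) : m ≤ l.foldl max m := by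
  induction l generalizing m with
  | nil => simp
  | cons x t ih => exact le_trans (le_max_left m x) (ih (max m x))

theorem pv_foldl_max_mem (l : List Int) (m : Int) :
    l.foldl max m = m ∨ l.foldl max m ∈ l := by
  induction l generalizing m with
  | nil => simp
  | cons x t ih =>
    rcases ih (max m x) with h | h
    · simp only [List.foldl_cons, h]
      rcases max_choice m x with h' | h'
      · exact Or.inl h'
      · exact Or.inr (by simp [h'])
    · exact Or.inr (by simp [List.foldl_cons, h])

-- characterisation of A's loop: result is the running max and the first index achieving it
theorem pvLoopA_char (l : List Int) (a m j : Int) :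
    pvLoopA l a (m, j) =
      (l.foldl max m,
       if l.foldl max m ≤ m then j
       else a + (((PySem.List.index? l (l.foldl max m)).getD 0 : Nat) : Int)) := by
  induction l generalizing a m j with
  | nil => simp [pvLoopA_nil]
  | cons x t ih =>
    rw [pvLoopA_cons]
    simp only [List.foldl_cons]
    by_cases hmx : m < x
    · rw [if_pos hmx]
      rw [ih]
      have hmax : max m x = x := max_eq_right (le_of_lt hmx)
      rw [hmax]
      have hx_le : x ≤ t.foldl max x := pv_le_foldl_max t x
      by_cases hF : t.foldl max x ≤ x
      · have hFx : t.foldl max x = x := le_antisymm hF hx_le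
        rw [if_pos hF, hFx, if_neg (by omega)]
        rw [PySem.List.index?_cons_self]
        simp
      · rw [if_neg hF]
        have hne : x ≠ t.foldl max x := by omega
        rw [if_neg (by omega)]
        rw [PySem.List.index?_cons_of_ne t hne]
        have hmem : t.foldl max x ∈ t := by
          rcases pv_foldl_max_mem t x with h | h
          · omega
          · exact h
        rcases (PySem.List.index?_isSome_iff t (t.foldl max x)).mpr hmem with h
        rcases Option.isSome_iff_exists.mp h with ⟨k, hk⟩
        rw [hk]
        simp only [Option.map_some, Option.getD_some, Prod.mk.injEq]
        exact ⟨trivial, by push_cast; ring⟩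
    · rw [if_neg hmx]
      rw [ih]
      have hmax : max m x = m := max_eq_left (by omega)
      rw [hmax]
      by_cases hF : t.foldl max m ≤ m
      · rw [if_pos hF, if_pos hF]
      · rw [if_neg hF]
        have hne : x ≠ t.foldl max m := by omega
        rw [if_neg hF]
        rw [PySem.List.index?_cons_of_ne t hne]
        have hmem : t.foldl max m ∈ t := by
          rcases pv_foldl_max_mem t m with h | h
          · omega
          · exact h
        rcases Option.isSome_iff_exists.mp ((PySem.List.index?_isSome_iff t (t.foldl max m)).mpr hmem) with ⟨k, hk⟩
        rw [hk]
        simp only [Option.map_some, Option.getD_some, Prod.mk.injEq]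
        exact ⟨trivial, by push_cast; ring⟩

-- bridge: A's fold over range(1, len) with indexing IS pvLoopA over the mapped areas
theorem pv_fold_bridge (sizes : List (List (String × Int))) :
    ∀ (k a : Nat) (p : Int × Int), sizes.length - a = k →
    (PySem.List.pyRange (a : Int) sizes.length 1).foldl
      (fun (p : Int × Int) i =>
        if p.1 < pvArea (PySem.List.pyGetD sizes i []) then
          (pvArea (PySem.List.pyGetD sizes i []), i)
        else p) p
    = pvLoopA ((sizes.drop a).map pvArea) (a : Int) p := by
  intro k
  induction k with
  | zero =>
    intro a p h
    have ha : sizes.length ≤ a := by omega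
    rw [PySem.List.pyRange_one_eq_nil (by exact_mod_cast ha)]
    rw [List.drop_eq_nil_of_le ha]
    rfl
  | succ n ih =>
    intro a p h
    have ha : a < sizes.length := by omega
    rw [PySem.List.pyRange_one_cons (by exact_mod_cast ha)]
    rw [List.foldl_cons]
    have hget : PySem.List.pyGetD sizes (a : Int) [] = sizes[a] :=
      PySem.List.pyGetD_ofNat sizes a [] ha
    have hdrop : sizes.drop a = sizes[a] :: sizes.drop (a + 1) :=
      List.drop_eq_getElem_cons ha
    rw [hdrop]
    simp only [List.map_cons]
    rw [pvLoopA_cons]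
    have := ih (a + 1) (if p.1 < pvArea (PySem.List.pyGetD sizes (a : Int) []) then
          (pvArea (PySem.List.pyGetD sizes (a : Int) []), (a : Int)) else p) (by omega)
    push_cast at this ⊢
    rw [this, hget]

-- ===== VERDICT (by name: the statement is the Claim_ definition above) =====
theorem get_max_photo_size_py_spec : Claim_equal_get_max_photo_size_py := by
  intro sizes _hdom hpre
  obtain ⟨hne, _⟩ := hpre
  unfold Spec_get_max_photo_size_py get_max_photo_size_py get_max_photo_size_py_alt
  obtain ⟨s0, rest, rfl⟩ := List.exists_cons_of_ne_nil hne
  simp only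
  have hbr := pv_fold_bridge (s0 :: rest) rest.length 1
      (pvArea (PySem.List.pyGetD (s0 :: rest) 0 []), 0) (by simp)
  have h1 : ((1 : Nat) : Int) = (1 : Int) := rfl
  rw [h1] at hbr
  rw [hbr]
  have hget0 : PySem.List.pyGetD (s0 :: rest) (0 : Int) [] = s0 :=
    PySem.List.pyGetD_zero_cons s0 rest []
  rw [hget0]
  simp only [List.drop_one, List.tail_cons]
  rw [pvLoopA_char]
  set M := (rest.map pvArea).foldl max (pvArea s0) with hM
  have hmax? : PySem.List.max? (List.map pvArea (s0 :: rest)) (fun y => y) = some M := by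
    rw [List.map_cons]
    exact PySem.List.max?_id_cons _ _
  simp only [hmax?, Option.getD_some]
  have ha0 : pvArea s0 ≤ M := pv_le_foldl_max _ _
  by_cases hF : M ≤ pvArea s0
  · -- the head is already maximal: loop index 0, B's index? finds the head
    have hMa0 : M = pvArea s0 := le_antisymm hF ha0
    have hidx : PySem.List.index? (List.map pvArea (s0 :: rest)) M = some 0 := by
      rw [List.map_cons, hMa0]
      exact PySem.List.index?_cons_self _ _
    rw [if_pos hF, hidx]
    by_cases h0 : M = 0
    · simp [h0]
    · simp [h0]
  · rw [if_neg hF]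
    have hne0 : pvArea s0 ≠ M := by omega
    have hmem : M ∈ rest.map pvArea := by
      rcases pv_foldl_max_mem (rest.map pvArea) (pvArea s0) with h | h
      · omega
      · exact h
    obtain ⟨k, hk⟩ := Option.isSome_iff_exists.mp
      ((PySem.List.index?_isSome_iff _ _).mpr hmem)
    have hidx : PySem.List.index? (List.map pvArea (s0 :: rest)) M = some (k + 1) := by
      rw [List.map_cons, PySem.List.index?_cons_of_ne _ hne0, hk]
      rfl
    rw [hidx]
    by_cases h0 : M = 0
    · simp [h0]
    · rw [hk]
      simp [h0]
      rw [add_comm 1 (k : Int)]
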